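-- pv_equiv track=rewrite | github.com/esthel7/Baekjoon | 프로그래머스/lv1/82612. 부족한 금액 계산하기/부족한 금액 계산하기.py | solution
-- ===== SOURCE A (Python) =====
-- def solution(price, money, count):
--     answer = -1
--     total=0
--     for i in range(count):
--         newPrice=price*(i+1)
--         total+=newPrice
--     if total<=money:
--         answer=0
--     else:
--         answer=total-money
--     return answer
-- ===== SOURCE B (Python) =====
-- def solution(price, money, count):
--     n = count if count > 0 else 0
--     total = price * n * (n + 1) // 2
--     return total - money if total > money else 0
-- ===== Notes on version B (the rewrite author's own statement) =====
-- stated objective: faster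
-- what changed: Replaces the O(count) accumulation loop with the closed-form arithmetic-series sum price*n*(n+1)//2.
import Mathlib
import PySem

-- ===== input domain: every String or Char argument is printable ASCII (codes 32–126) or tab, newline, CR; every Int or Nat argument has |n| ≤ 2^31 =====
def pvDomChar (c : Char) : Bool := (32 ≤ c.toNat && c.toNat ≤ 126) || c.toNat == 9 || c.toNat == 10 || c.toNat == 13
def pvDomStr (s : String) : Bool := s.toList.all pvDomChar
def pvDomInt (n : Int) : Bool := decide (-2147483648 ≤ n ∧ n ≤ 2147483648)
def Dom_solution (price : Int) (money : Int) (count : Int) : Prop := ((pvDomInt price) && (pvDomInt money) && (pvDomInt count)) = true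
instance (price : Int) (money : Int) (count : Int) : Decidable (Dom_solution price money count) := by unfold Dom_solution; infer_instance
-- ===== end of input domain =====

-- B replaces A's O(count) accumulation loop with the closed-form arithmetic-series sum price*n*(n+1)//2 (faster).


-- ===== PORT A =====
def solution (price : Int) (money : Int) (count : Int) : Int :=
  let answer : Int := -1
  let total : Int := (PySem.List.pyRange 0 count 1).foldl
    (fun total i =>
      let newPrice := price * (i + 1)
      total + newPrice) 0
  let answer := if total ≤ money then (0 : Int) else total - money
  answer

-- ===== PORT B =====
def solution_alt (price : Int) (money : Int) (count : Int) : Int :=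
  let n : Int := if count > 0 then count else 0
  let total : Int := PySem.Int.floordiv (price * n * (n + 1)) 2
  if total > money then total - money else 0

-- ===== PRECONDITION & SPEC =====
def Spec_solution (price : Int) (money : Int) (count : Int) (out : Int) : Prop := out = solution_alt price money count
instance (price : Int) (money : Int) (count : Int) (out : Int) : Decidable (Spec_solution price money count out) := by unfold Spec_solution; infer_instance

-- ===== CLAIM (what is proved, stated in full; the proofs are below) =====
def Claim_equal_solution : Prop := ∀ (price : Int) (money : Int) (count : Int), Dom_solution price money count → Spec_solution price money count (solution price money count)

-- ===== LEMMAS AND PROOFS =====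

-- the loop computes acc + price * triangle(n), where triangle(n) = n*(n+1)/2
theorem pv_loop_sum (price : Int) (n : Nat) : ∀ (acc : Int),
    (PySem.List.pyRange 0 (n : Int) 1).foldl
      (fun total i => let newPrice := price * (i + 1); total + newPrice) acc
      = acc + price * ((n : Int) * ((n : Int) + 1) / 2) := by
  induction n with
  | zero => intro acc; simp [PySem.List.pyRange_one_eq_nil]
  | succ m ih =>
    intro acc
    have hsplit : PySem.List.pyRange 0 ((m + 1 : Nat) : Int) 1
        = PySem.List.pyRange 0 (m : Int) 1 ++ [(m : Int)] := by
      push_cast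
      exact PySem.List.pyRange_one_succ_right (by positivity)
    rw [hsplit, List.foldl_append, ih]
    simp only [List.foldl_cons, List.foldl_nil]
    have h2 : (2 : Int) ∣ (m : Int) * ((m : Int) + 1) := (Int.even_mul_succ_self _).two_dvd
    have hb : ((m : Int) + 1) * (((m : Int) + 1) + 1) = (m : Int) * ((m : Int) + 1) + 2 * ((m : Int) + 1) := by ring
    have htri : (m : Int) * ((m : Int) + 1) / 2 + ((m : Int) + 1)
        = ((m : Int) + 1) * (((m : Int) + 1) + 1) / 2 := by omega
    push_cast
    rw [← htri]
    ring

theorem pv_closed (price n : Int)  :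
    PySem.Int.floordiv (price * n * (n + 1)) 2 = price * (n * (n + 1) / 2) := by
  rw [PySem.Int.floordiv_eq_ediv_of_pos (by omega)]
  have h2 : (2 : Int) ∣ n * (n + 1) := (Int.even_mul_succ_self n).two_dvd
  rw [mul_assoc, Int.mul_ediv_assoc price h2]

-- ===== VERDICT (by name: the statement is the Claim_ definition above) =====
theorem solution_spec : Claim_equal_solution := by
  unfold Claim_equal_solution Spec_solution solution solution_alt
  intro price money count _
  dsimp only
  by_cases h : 0 < count
  · have hA := pv_loop_sum price count.toNat 0
    have hc : ((count.toNat : Nat) : Int) = count := by omega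
    rw [hc] at hA
    rw [hA, if_pos h, pv_closed price count]
    simp only [zero_add]
    split_ifs <;> omega
  · rw [PySem.List.pyRange_one_eq_nil (by omega), if_neg h]
    have h0 : PySem.Int.floordiv (price * 0 * (0 + 1)) 2 = 0 := by
      rw [pv_closed price 0]; simp
    rw [h0]
    simp only [List.foldl_nil]
    split_ifs <;> omega
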